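-- pv_equiv track=rewrite | github.com/imikaa/pees | main.py | create_dicts
-- ===== SOURCE A (Python) =====
-- def create_dicts(docs):
--     dicts = []
--     for i in range( len(docs) ) :
--         words = list( docs[i].split(" ") )
--         dictionary = {}
--         for token in words :
--             if token in dictionary.keys():
--                 dictionary[token] += 1
--             else:
--                 dictionary[token] = 1
--
--         dicts.append( dictionary )
--     return dicts
-- ===== SOURCE B (Python) =====
-- def _freqs(doc):
--     words = doc.split(" ")
--     # dict.fromkeys keeps first occurrences in order, so the key order
--     # matches the insertion order of an incremental count.
--     return {w: words.count(w) for w in dict.fromkeys(words)}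
--
--
-- def create_dicts(docs):
--     return [_freqs(doc) for doc in docs]
-- ===== Notes on version B (the rewrite author's own statement) =====
-- stated objective: simpler
-- what changed: Replaces the incremental membership-test-and-increment loop with a dict comprehension over the ordered-deduplicated word list, computing each word's frequency directly with list.count.
import Mathlib
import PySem

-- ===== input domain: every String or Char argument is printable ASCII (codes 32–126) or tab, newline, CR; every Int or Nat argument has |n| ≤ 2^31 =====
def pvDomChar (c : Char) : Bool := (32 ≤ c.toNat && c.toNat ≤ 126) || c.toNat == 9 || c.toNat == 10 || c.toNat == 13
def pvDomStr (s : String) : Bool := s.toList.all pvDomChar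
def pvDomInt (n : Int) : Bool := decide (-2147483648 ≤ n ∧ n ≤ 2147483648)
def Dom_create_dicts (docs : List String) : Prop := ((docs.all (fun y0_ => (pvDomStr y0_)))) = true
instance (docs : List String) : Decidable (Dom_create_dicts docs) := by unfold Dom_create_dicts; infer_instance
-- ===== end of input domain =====

-- B replaces A's membership-test-and-increment loop by a dict comprehension over the
-- ordered-deduplicated word list with list.count per distinct word (objective: simpler).

-- shared primitive: doc.split(" ") — sep is the non-empty literal " ", so split? never raises
def pySplitSpace (s : String) : List String := (PySem.Str.split? s " ").getD []

-- ===== PORT A =====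
def create_dicts (docs : List String) : List (List (String × Int)) :=
  (PySem.List.pyRange 0 (PySem.List.len docs)).foldl (fun dicts i =>
    let words := pySplitSpace (PySem.List.pyGetD docs i "")
    let dictionary := words.foldl (fun d token =>
      if d.contains token then d.insert token (d.getD token 0 + 1)
      else d.insert token 1) PySem.Dict.empty
    dicts ++ [dictionary.items]) []

-- ===== PORT B =====
def create_dicts_alt (docs : List String) : List (List (String × Int)) :=
  docs.map (fun doc =>
    let words := pySplitSpace doc
    ((PySem.List.dedup words).foldl
      (fun d w => d.insert w ((words.count w : Int))) PySem.Dict.empty).items)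

-- ===== PRECONDITION & SPEC =====
def Spec_create_dicts (docs : List String) (out : List (List (String × Int))) : Prop := out = create_dicts_alt docs
instance (docs : List String) (out : List (List (String × Int))) : Decidable (Spec_create_dicts docs out) := by unfold Spec_create_dicts; infer_instance

-- ===== CLAIM (what is proved, stated in full; the proofs are below) =====
def Claim_equal_create_dicts : Prop := ∀ (docs : List String), Dom_create_dicts docs → Spec_create_dicts docs (create_dicts docs)

-- ===== LEMMAS AND PROOFS =====

-- Per document: A's incremental counting dict has the same items list as B's
-- count-per-distinct-word dict (first-occurrence key order on both sides).
theorem perdoc_items (ws : List String) :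
    (ws.foldl (fun d token =>
        if d.contains token then d.insert token (d.getD token 0 + 1)
        else d.insert token 1) PySem.Dict.empty).items
    = ((PySem.List.dedup ws).foldl
        (fun d w => d.insert w ((ws.count w : Int))) PySem.Dict.empty).items := by
  have hfun : (fun (d : PySem.Dict String Int) token =>
      if d.contains token then d.insert token (d.getD token 0 + 1)
      else d.insert token 1) = (fun d x => d.insert x (d.getD x 0 + 1)) := by
    funext d t
    cases h : d.contains t
    · simp [PySem.Dict.getD_of_not_contains d 0 h]
    · simp
  rw [hfun, PySem.Dict.foldl_insert_getD_add_one_eq_counter, PySem.Dict.items_counter,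
    PySem.Dict.items_foldl_insert_fresh (PySem.List.dedup ws) (fun w => w)
      (fun w => ((ws.count w : Nat) : Int)) PySem.Dict.empty
      (by intro a _; simp)
      (by simp)]
  simp [PySem.List.dedup_eq_ofList, PySem.Dict.empty]

theorem create_dicts_spec : Claim_equal_create_dicts := by
  intro docs _
  unfold Spec_create_dicts create_dicts create_dicts_alt
  rw [PySem.List.foldl_append_singleton_eq_map]
  conv_rhs => rw [← PySem.List.map_pyGetD_pyRange_zero docs "", List.map_map]
  simp only [List.nil_append]
  refine List.map_congr_left ?_
  intro i _
  simp only [Function.comp_apply]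
  exact perdoc_items (pySplitSpace (PySem.List.pyGetD docs i ""))
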